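-- pv_equiv track=rewrite | github.com/abaldeg/EjerciciosPython | PROGRAMACION I MatrizZigZagporFilas.py | generamatzigzagxfila
-- ===== SOURCE A (Python) =====
-- def generamatzigzagxfila(n):
--     mat=[[0]*n for i in range(n)]
--     numero=1
--     for f in range(n):
--         if f%2!=0:
--             for c in range(n-1,-1,-1):
--                 mat[f][c]=numero
--                 numero+=1
--         elif f%2==0 or f==0:
--             """es par"""
--             for c in range(n):
--                 mat[f][c]=numero
--                 numero+=1
--
--     return(mat)
-- ===== SOURCE B (Python) =====
-- def generamatzigzagxfila(n):
--     mat = []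
--     for f in range(n):
--         row = list(range(f * n + 1, f * n + n + 1))
--         if f % 2:
--             row.reverse()
--         mat.append(row)
--     return mat
-- ===== Notes on version B (the rewrite author's own statement) =====
-- stated objective: alternative
-- what changed: Replaces the stateful counter threaded through nested write loops by a closed form per row: row f holds the next block of n consecutive integers computed directly from f, reversed when f is odd.
import Mathlib
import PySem

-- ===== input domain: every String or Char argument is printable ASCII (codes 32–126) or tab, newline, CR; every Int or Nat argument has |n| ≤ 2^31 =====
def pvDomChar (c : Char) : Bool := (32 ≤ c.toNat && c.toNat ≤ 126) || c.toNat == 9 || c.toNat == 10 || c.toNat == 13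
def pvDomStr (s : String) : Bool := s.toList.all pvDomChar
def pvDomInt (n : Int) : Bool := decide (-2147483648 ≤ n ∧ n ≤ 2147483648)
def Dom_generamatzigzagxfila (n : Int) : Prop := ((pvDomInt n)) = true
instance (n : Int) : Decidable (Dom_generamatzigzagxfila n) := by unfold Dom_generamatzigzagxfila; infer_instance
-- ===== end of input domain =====

-- B replaces A's running counter threaded through the row loops by a closed-form
-- per-cell formula computed from the coordinates (objective: simpler).

-- ===== PORT A =====
-- one assignment step of A's inner loops: mat[f][c] = numero; numero += 1
def pvInner (f : Int) (st : List (List Int) × Int) (c : Int) : List (List Int) × Int :=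
  (st.1.set f.toNat ((st.1.getD f.toNat []).set c.toNat st.2), st.2 + 1)

def generamatzigzagxfila (n : Int) : List (List Int) :=
  -- mat = [[0]*n for i in range(n)]
  let mat := (PySem.List.pyRange 0 n 1).map (fun _ => List.replicate n.toNat (0 : Int))
  -- for f in range(n): … (numero threaded as the second state component)
  let res := (PySem.List.pyRange 0 n 1).foldl
    (fun st f =>
      if f % 2 ≠ 0 then
        (PySem.List.pyRange (n - 1) (-1) (-1)).foldl (pvInner f) st
      else
        (PySem.List.pyRange 0 n 1).foldl (pvInner f) st)
    (mat, 1)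
  res.1

-- ===== PORT B =====
def generamatzigzagxfila_alt (n : Int) : List (List Int) :=
  -- row f holds the next block of consecutive values, reversed when f is odd
  (PySem.List.pyRange 0 n 1).map (fun f =>
    let row := PySem.List.pyRange (f * n + 1) (f * n + n + 1) 1
    if f % 2 ≠ 0 then row.reverse else row)

-- ===== PRECONDITION & SPEC =====
def Spec_generamatzigzagxfila (n : Int) (out : List (List Int)) : Prop := out = generamatzigzagxfila_alt n
instance (n : Int) (out : List (List Int)) : Decidable (Spec_generamatzigzagxfila n out) := by unfold Spec_generamatzigzagxfila; infer_instance

-- ===== CLAIM (what is proved, stated in full; the proofs are below) =====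
def Claim_equal_generamatzigzagxfila : Prop := ∀ (n : Int), Dom_generamatzigzagxfila n → Spec_generamatzigzagxfila n (generamatzigzagxfila n)

-- ===== LEMMAS AND PROOFS =====

-- sequential writes of num, num+1, … into positions cs of a row
def pvW (row : List Int) (cs : List Int) (num : Int) : List Int :=
  match cs with
  | [] => row
  | c :: cs => pvW (row.set c.toNat num) cs (num + 1)

-- closed form of row f (f, k as naturals), the loop invariant's row description
def pvBrow (k f : Nat) : List Int :=
  (List.range k).map (fun c : Nat =>
    if (f : Int) % 2 = 0 then (f : Int) * k + c + 1 else (f : Int) * k + k - c)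

theorem pvDropSet (l : List Int) (i : Nat) (a : Int) (h : i < l.length) :
    (l.set i a).drop i = a :: l.drop (i + 1) := by
  rw [List.set_eq_take_append_cons_drop, if_pos h,
      List.drop_append_of_le_length (by simp [List.length_take]; omega)]
  simp

theorem pvInner_foldl (cs : List Int) (mat : List (List Int)) (num : Int) (f : Int)
    (hf : f.toNat < mat.length) :
    cs.foldl (pvInner f) (mat, num)
      = (mat.set f.toNat (pvW (mat.getD f.toNat []) cs num), num + cs.length) := by
  induction cs generalizing mat num with
  | nil =>
      simp only [List.foldl_nil, pvW, List.length_nil, Nat.cast_zero, add_zero]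
      rw [List.getD_eq_getElem?_getD, List.getElem?_eq_getElem hf]
      simp [List.set_getElem_self hf]
  | cons c cs ih =>
      have hf' : f.toNat < (mat.set f.toNat ((mat.getD f.toNat []).set c.toNat num)).length := by
        simpa using hf
      simp only [List.foldl_cons, pvInner]
      rw [ih _ _ hf']
      simp only [pvW, List.set_set]
      rw [List.getD_eq_getElem?_getD, List.getElem?_set_self hf]
      simp only [Option.getD_some, List.length_cons]
      refine Prod.ext rfl ?_
      push_cast; ring

theorem pvW_append (cs ds : List Int) (row : List Int) (num : Int) :
    pvW row (cs ++ ds) num = pvW (pvW row cs num) ds (num + cs.length) := by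
  induction cs generalizing row num with
  | nil => simp [pvW]
  | cons c cs ih =>
      simp only [List.cons_append, pvW, ih, List.length_cons]
      have : num + 1 + (cs.length : Int) = num + ((cs.length : Int) + 1) := by ring
      rw [this]; norm_cast

theorem pvW_asc (k : Nat) (row : List Int) (num : Int) (hk : k ≤ row.length) :
    pvW row ((List.range k).map (fun j : Nat => (j : Int))) num
      = (List.range k).map (fun c : Nat => num + (c : Int)) ++ row.drop k := by
  induction k with
  | zero => simp [pvW]
  | succ k ih =>
      have hk' : k < row.length := Nat.lt_of_lt_of_le (Nat.lt_succ_self k) hk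
      rw [List.range_succ, List.map_append, pvW_append, ih (Nat.le_of_lt hk')]
      simp only [List.map_cons, List.map_nil, pvW, List.length_map, List.length_range,
        Int.toNat_natCast]
      rw [List.set_append]
      simp only [List.length_map, List.length_range, Nat.lt_irrefl, if_false, Nat.sub_self]
      rw [List.drop_eq_getElem_cons hk', List.set_cons_zero]
      simp

theorem pvW_desc (k : Nat) (row : List Int) (num : Int) (hk : k ≤ row.length) :
    pvW row ((List.range k).map (fun j : Nat => (k : Int) - 1 - (j : Int))) num
      = (List.range k).map (fun c : Nat => num + (k : Int) - 1 - (c : Int)) ++ row.drop k := by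
  induction k generalizing row num with
  | zero => simp [pvW]
  | succ k ih =>
      have hk' : k < row.length := Nat.lt_of_lt_of_le (Nat.lt_succ_self k) hk
      have hcs : (List.range (k + 1)).map (fun j : Nat => ((k + 1 : Nat) : Int) - 1 - (j : Int))
          = (k : Int) :: (List.range k).map (fun j : Nat => (k : Int) - 1 - (j : Int)) := by
        rw [List.range_succ_eq_map, List.map_cons, List.map_map]
        refine congrArg₂ _ (by omega) ?_
        apply List.map_congr_left; intro j _; simp only [Function.comp]; omega
      rw [hcs]
      simp only [pvW, Int.toNat_natCast]
      rw [ih (row.set k num) (num + 1) (by simpa using Nat.le_of_lt hk),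
          pvDropSet row k num hk']
      rw [List.range_succ, List.map_append]
      have hmap : (List.range k).map (fun c : Nat => num + 1 + (k : Int) - 1 - (c : Int))
          = (List.range k).map (fun c : Nat => num + ((k + 1 : Nat) : Int) - 1 - (c : Int)) := by
        apply List.map_congr_left; intro c _; push_cast; ring
      rw [hmap]
      simp only [List.map_cons, List.map_nil, List.append_assoc, List.singleton_append]
      have : num + ((k + 1 : Nat) : Int) - 1 - (k : Int) = num := by push_cast; ring
      rw [this]

theorem pvOuter (k m : Nat) (hm : m ≤ k) :
    (((List.range m).map (fun j : Nat => (j : Int))).foldl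
      (fun st f =>
        if f % 2 ≠ 0 then
          (PySem.List.pyRange ((k : Int) - 1) (-1) (-1)).foldl (pvInner f) st
        else
          ((List.range k).map (fun j : Nat => (j : Int))).foldl (pvInner f) st)
      (List.replicate k (List.replicate k (0 : Int)), 1))
    = ((List.range m).map (fun f => pvBrow k f)
        ++ List.replicate (k - m) (List.replicate k (0 : Int)), (m : Int) * (k : Int) + 1) := by
  induction m with
  | zero => simp
  | succ m ih =>
      have hm' : m < k := hm
      rw [List.range_succ, List.map_append, List.foldl_append, ih (Nat.le_of_lt hm')]
      simp only [List.map_cons, List.map_nil, List.foldl_cons, List.foldl_nil]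
      set P := (List.range m).map (fun f => pvBrow k f) with hP
      have hPlen : P.length = m := by simp [hP]
      have hlen : (P ++ List.replicate (k - m) (List.replicate k (0 : Int))).length = k := by
        simp [hPlen]; omega
      have hfN : ((m : Int)).toNat = m := Int.toNat_natCast m
      have hflt : ((m : Int)).toNat < (P ++ List.replicate (k - m) (List.replicate k (0 : Int))).length := by
        rw [hfN, hlen]; exact hm'
      have hrep : List.replicate (k - m) (List.replicate k (0 : Int))
          = List.replicate k (0 : Int) :: List.replicate (k - (m + 1)) (List.replicate k (0 : Int)) := by
        rw [show k - m = (k - (m + 1)) + 1 by omega, List.replicate_succ]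
      have hgetD : (P ++ List.replicate (k - m) (List.replicate k (0 : Int))).getD ((m : Int)).toNat []
          = List.replicate k (0 : Int) := by
        rw [hfN, List.getD_eq_getElem?_getD, List.getElem?_append_right (by omega), hPlen]
        simp [hrep]
      have hsetmat : ∀ X : List Int,
          (P ++ List.replicate (k - m) (List.replicate k (0 : Int))).set ((m : Int)).toNat X
            = P ++ X :: List.replicate (k - (m + 1)) (List.replicate k (0 : Int)) := by
        intro X
        rw [hfN, ← hPlen, List.set_append_right _ _ (le_refl _), Nat.sub_self, hPlen, hrep]
        simp
      have hrows : (List.range m ++ [m]).map (fun f => pvBrow k f) = P ++ [pvBrow k m] := by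
        rw [List.map_append, ← hP]; simp
      have hnum : ((m : Int)) * (k : Int) + 1 + (k : Nat) = ((m + 1 : Nat) : Int) * (k : Int) + 1 := by
        push_cast; ring
      by_cases hpar : (m : Int) % 2 ≠ 0
      · -- odd row: c from n-1 down to 0
        rw [if_pos hpar]
        rw [PySem.List.pyRange_neg_one]
        have hcnt : ((k : Int) - 1 - (-1)).toNat = k := by omega
        rw [hcnt]
        rw [show (fun j : Nat => (k : Int) - 1 - (j : Int)) = fun j : Nat => (k : Int) - 1 - (j : Int) from rfl]
        rw [pvInner_foldl _ _ _ _ hflt, hgetD,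
            pvW_desc k _ _ (by simp)]
        simp only [List.drop_replicate, Nat.sub_self, List.replicate_zero, List.append_nil]
        have hW : (List.range k).map (fun c : Nat => (m : Int) * (k : Int) + 1 + (k : Int) - 1 - (c : Int))
            = pvBrow k m := by
          unfold pvBrow
          apply List.map_congr_left; intro c _
          rw [if_neg (by omega)]; ring
        rw [hsetmat, hrows, hW]
        refine Prod.ext ?_ ?_
        · simp
        · simp only [List.length_map, List.length_range]
          exact hnum
      · -- even row: c from 0 to n-1
        rw [if_neg hpar]
        rw [pvInner_foldl _ _ _ _ hflt, hgetD, pvW_asc k _ _ (by simp)]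
        simp only [List.drop_replicate, Nat.sub_self, List.replicate_zero, List.append_nil]
        have hW : (List.range k).map (fun c : Nat => (m : Int) * (k : Int) + 1 + (c : Int))
            = pvBrow k m := by
          unfold pvBrow
          apply List.map_congr_left; intro c _
          rw [if_pos (by omega)]; ring
        rw [hsetmat, hrows, hW]
        refine Prod.ext ?_ ?_
        · simp
        · simp only [List.length_map, List.length_range]
          exact hnum

theorem pvBrow_eq (k m : Nat) :
    pvBrow k m
      = (if (m : Int) % 2 ≠ 0
          then (PySem.List.pyRange ((m : Int) * (k : Int) + 1) ((m : Int) * (k : Int) + (k : Int) + 1) 1).reverse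
          else PySem.List.pyRange ((m : Int) * (k : Int) + 1) ((m : Int) * (k : Int) + (k : Int) + 1) 1) := by
  have hr : PySem.List.pyRange ((m : Int) * (k : Int) + 1) ((m : Int) * (k : Int) + (k : Int) + 1) 1
      = (List.range k).map (fun j : Nat => (m : Int) * (k : Int) + 1 + (j : Int)) := by
    rw [PySem.List.pyRange_one]
    have hcnt : ((m : Int) * (k : Int) + (k : Int) + 1 - ((m : Int) * (k : Int) + 1)).toNat = k := by
      omega
    rw [hcnt]
  by_cases hm : (m : Int) % 2 = 0
  · rw [if_neg (by simp [hm]), hr]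
    unfold pvBrow
    apply List.map_congr_left; intro c _
    rw [if_pos hm]; ring
  · rw [if_pos hm, hr]
    unfold pvBrow
    apply List.ext_getElem (by simp)
    intro i h1 h2
    have hik : i < k := by simpa using h1
    rw [List.getElem_reverse]
    simp only [List.getElem_map, List.getElem_range, List.length_map, List.length_range]
    rw [if_neg hm]
    have : ((k - 1 - i : Nat) : Int) = (k : Int) - 1 - (i : Int) := by omega
    rw [this]; ring

-- ===== VERDICT (by name: the statement is the Claim_ definition above) =====
theorem generamatzigzagxfila_spec : Claim_equal_generamatzigzagxfila := by
  intro n _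
  unfold Spec_generamatzigzagxfila
  by_cases h : n ≤ 0
  · simp [generamatzigzagxfila, generamatzigzagxfila_alt, PySem.List.pyRange_one_eq_nil h]
  · have h0 : 0 ≤ n := le_of_lt (lt_of_not_ge h)
    have hn : ((n.toNat : Int)) = n := Int.toNat_of_nonneg h0
    set k := n.toNat with hk
    unfold generamatzigzagxfila generamatzigzagxfila_alt
    rw [← hn]
    have hrange : PySem.List.pyRange 0 (k : Int) 1 = (List.range k).map (fun j : Nat => (j : Int)) := by
      rw [PySem.List.pyRange_one]
      simp
    have hmat0 : (PySem.List.pyRange 0 (k : Int) 1).map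
          (fun _ => List.replicate ((k : Int)).toNat (0 : Int))
        = List.replicate k (List.replicate k (0 : Int)) := by
      rw [hrange]
      simp [Function.comp_def, List.map_const']
    simp only [hmat0]
    rw [hrange]
    rw [pvOuter k k (le_refl k)]
    simp only [Nat.sub_self, List.replicate_zero, List.append_nil, List.map_map]
    apply List.map_congr_left
    intro m _
    simp only [Function.comp]
    exact pvBrow_eq k m
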